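-- pv_equiv track=rewrite | github.com/ImGeuntae/CodingTest | 프로그래머스/1/92334. 신고 결과 받기/신고 결과 받기.py | solution
-- ===== SOURCE A (Python) =====
-- def solution(id_list, report, k):
--     id_list, mail_list = dict.fromkeys(id_list,0), dict.fromkeys(id_list,"")
--     report = list(set(report))
--     for i in report:
--         a,b = i.split(" ")
--         id_list[b] += 1
--         mail_list[a] += (b + " ")
--     answer = []
--     for key,value in mail_list.items():
--         answer.append(len([x for x in value.split(" ")[:-1] if id_list[x] >= k]))
--     return answer
-- ===== SOURCE B (Python) =====
-- def solution(id_list, report, k):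
--     # one flat counting pass + banned set, instead of per-reporter mail strings rescanned per user
--     pairs = [r.split(" ") for r in set(report)]
--     count = dict.fromkeys(id_list, 0)
--     for a, b in pairs:
--         count[b] += 1
--     banned = {u for u in id_list if count[u] >= k}
--     answer = dict.fromkeys(id_list, 0)
--     for a, b in pairs:
--         if b in banned:
--             answer[a] += 1
--     return list(answer.values())
-- ===== Notes on version B (the rewrite author's own statement) =====
-- stated objective: alternative
-- what changed: Replaces A's per-reporter mail strings (concatenate targets, then re-split and filter each user's string) by one flat pass over the deduplicated reports that increments a per-reporter answer dict when the target is in a precomputed banned set; no string building or re-splitting.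
import Mathlib
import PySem

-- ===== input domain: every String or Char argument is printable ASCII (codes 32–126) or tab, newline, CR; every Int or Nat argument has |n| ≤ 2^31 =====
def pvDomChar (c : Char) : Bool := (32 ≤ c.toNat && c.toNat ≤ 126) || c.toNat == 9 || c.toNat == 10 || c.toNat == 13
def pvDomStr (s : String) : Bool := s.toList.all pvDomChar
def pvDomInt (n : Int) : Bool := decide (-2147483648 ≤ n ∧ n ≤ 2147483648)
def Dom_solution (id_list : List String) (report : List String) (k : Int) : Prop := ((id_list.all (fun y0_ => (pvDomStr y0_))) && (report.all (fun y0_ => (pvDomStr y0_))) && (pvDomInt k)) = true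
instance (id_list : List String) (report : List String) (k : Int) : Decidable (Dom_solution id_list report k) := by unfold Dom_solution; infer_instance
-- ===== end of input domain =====

-- B replaces A's per-reporter mail strings (built by concatenation, then re-split and
-- filtered per user) by one flat counting pass over the deduplicated reports with a
-- precomputed banned set; same return value on all inputs where A returns.

-- ===== PORT A =====
def solution (id_list : List String) (report : List String) (k : Int) : List Int :=
  -- id_list, mail_list = dict.fromkeys(id_list,0), dict.fromkeys(id_list,"")
  let cnt0 : PySem.Dict String Int := id_list.foldl (fun d x => d.insert x 0) PySem.Dict.empty
  let mail0 : PySem.Dict String (List Char) := id_list.foldl (fun d x => d.insert x []) PySem.Dict.empty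
  -- report = list(set(report))
  let rep : List String := PySem.Set.ofList report
  -- for i in report: a,b = i.split(" "); id_list[b] += 1; mail_list[a] += (b + " ")
  let st := rep.foldl (fun (st : PySem.Dict String Int × PySem.Dict String (List Char)) i =>
      match PySem.Chars.splitOn i.toList [' '] with
      | [a, b] => (st.1.modify (String.ofList b) 0 (· + 1),
                   st.2.modify (String.ofList a) [] (· ++ (b ++ [' '])))
      | _ => st)   -- Python raises ValueError here (unpacking); excluded by Pre_solution
    (cnt0, mail0)
  -- for key,value in mail_list.items(): answer.append(len([x for x in value.split(" ")[:-1] if id_list[x] >= k]))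
  st.2.items.foldl (fun answer kv =>
      answer ++ [(((PySem.List.slice (PySem.Chars.splitOn kv.2 [' ']) none (some (-1))).filter
          (fun x => decide (k ≤ st.1.getD (String.ofList x) 0))).length : Int)]) []

-- helpers: first and second component of a split report line ("a b" -> a, b)
def pvA (i : String) : List Char := (PySem.Chars.splitOn i.toList [' ']).headD []
def pvB (i : String) : List Char := ((PySem.Chars.splitOn i.toList [' ']).drop 1).headD []

-- ===== PORT B =====
def solution_alt (id_list : List String) (report : List String) (k : Int) : List Int :=
  -- pairs = [r.split(" ") for r in set(report)]
  let pairs := (PySem.Set.ofList report).map (fun r => PySem.Chars.splitOn r.toList [' '])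
  -- count = dict.fromkeys(id_list, 0); for a, b in pairs: count[b] += 1
  let count := pairs.foldl (fun d p =>
      if p.length == 2 then d.modify (String.ofList ((p.drop 1).headD [])) 0 (· + 1)
      else d)   -- Python raises ValueError here (unpacking); excluded by Pre_solution
    (id_list.foldl (fun d x => d.insert x (0 : Int)) PySem.Dict.empty)
  -- banned = {u for u in id_list if count[u] >= k}
  let banned : PySem.Set String := PySem.Set.ofList (id_list.filter (fun u => decide (k ≤ count.getD u 0)))
  -- answer = dict.fromkeys(id_list, 0); for a, b in pairs: if b in banned: answer[a] += 1
  let answer := pairs.foldl (fun d p =>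
      if p.length == 2 then
        (if banned.contains (String.ofList ((p.drop 1).headD [])) then
          d.modify (String.ofList (p.headD [])) 0 (· + 1) else d)
      else d)
    (id_list.foldl (fun d x => d.insert x (0 : Int)) PySem.Dict.empty)
  -- return list(answer.values())
  answer.values

-- ===== PRECONDITION & SPEC =====
-- Pre_solution admits exactly the inputs where A returns: every report line must split on a
-- single space into exactly two ids that are both in id_list (otherwise A raises ValueError
-- on the unpacking or KeyError on the dict lookups).
def Pre_solution (id_list : List String) (report : List String) (k : Int) : Prop :=
  (report.all (fun r => (PySem.Chars.splitOn r.toList [' ']).length == 2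
     && id_list.contains (String.ofList (pvA r)) && id_list.contains (String.ofList (pvB r)))) = true
instance (id_list : List String) (report : List String) (k : Int) : Decidable (Pre_solution id_list report k) := by unfold Pre_solution; infer_instance

def pvWitness_solution : List String × List String × Int :=
  (["muzi", "frodo", "apeach", "neo"],
   ["muzi frodo", "apeach frodo", "frodo neo", "muzi neo", "apeach muzi"], 2)

def Spec_solution (id_list : List String) (report : List String) (k : Int) (out : List Int) : Prop := out = solution_alt id_list report k
instance (id_list : List String) (report : List String) (k : Int) (out : List Int) : Decidable (Spec_solution id_list report k out) := by unfold Spec_solution; infer_instance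

-- ===== CLAIM (what is proved, stated in full; the proofs are below) =====
def Claim_equal_solution : Prop := ∀ (id_list : List String) (report : List String) (k : Int), Dom_solution id_list report k → Pre_solution id_list report k → Spec_solution id_list report k (solution id_list report k)

-- ===== LEMMAS AND PROOFS =====

theorem pv_splitOn_go (c : Char) (fuel : Nat) (l cur : List Char) (acc : List (List Char))
    (h : l.length < fuel) :
    PySem.Chars.splitOn.go [c] fuel l cur acc
      = acc.reverse ++ (List.splitOnP (· == c) l).modifyHead (cur.reverse ++ ·) := by
  induction fuel generalizing l cur acc with
  | zero => omega
  | succ f ih =>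
    cases l with
    | nil =>
      simp [PySem.Chars.splitOn.go, List.splitOnP_nil]
    | cons x rest =>
      rw [PySem.Chars.splitOn.go]
      simp only [List.isPrefixOf, List.splitOnP_cons]
      by_cases hx : c = x
      · subst hx
        simp only [BEq.rfl, Bool.true_and, if_true, List.length_cons, List.drop_succ_cons,
          List.drop_zero, List.length_nil]
        rw [ih rest [] (cur.reverse :: acc) (by simp at h ⊢; omega)]
        rcases hsp : List.splitOnP (· == c) rest with _ | ⟨hd, tl⟩
        · exact absurd hsp (List.splitOnP_ne_nil _ _)
        · simp
      · have hbx : (c == x) = false := by simp [hx]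
        have hxb : (x == c) = false := by simp [Ne.symm hx]
        simp only [hbx, hxb, Bool.false_and, if_false]
        rw [ih rest (x :: cur) acc (by simp at h ⊢; omega)]
        rcases hsp : List.splitOnP (· == c) rest with _ | ⟨hd, tl⟩
        · exact absurd hsp (List.splitOnP_ne_nil _ _)
        · simp
theorem pv_splitOn_singleton (c : Char) (s : List Char) :
    PySem.Chars.splitOn s [c] = List.splitOnP (· == c) s := by
  rw [PySem.Chars.splitOn, pv_splitOn_go c (s.length + 1) s [] [] (by omega)]
  rcases hsp : List.splitOnP (· == c) s with _ | ⟨hd, tl⟩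
  · exact absurd hsp (List.splitOnP_ne_nil _ _)
  · simp
theorem pv_splitOnP_pieces {α : Type} (p : α → Bool) (l : List α) :
    ∀ piece ∈ List.splitOnP p l, ∀ x ∈ piece, p x = false := by
  induction l with
  | nil => simp [List.splitOnP_nil]
  | cons a l ih =>
    rw [List.splitOnP_cons]
    by_cases hp : p a = true
    · simp only [hp, if_true]
      intro piece hpc
      rcases List.mem_cons.1 hpc with h | h
      · subst h; simp
      · exact ih piece h
    · simp only [hp, if_false]
      rcases hsp : List.splitOnP p l with _ | ⟨hd, tl⟩
      · exact absurd hsp (List.splitOnP_ne_nil _ _)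
      · intro piece hpc
        rcases List.mem_cons.1 (by simpa using hpc) with h | h
        · subst h
          intro x hx
          rcases List.mem_cons.1 hx with h | h
          · subst h; simpa using hp
          · exact ih hd (by rw [hsp]; exact List.mem_cons_self) x h
        · exact ih piece (by rw [hsp]; exact List.mem_cons_of_mem _ h)
theorem pv_flatten_intercalate (c : Char) (bs : List (List Char)) :
    (bs.map (· ++ [c])).flatten = [c].intercalate (bs ++ [[]]) := by
  induction bs with
  | nil => simp [List.intercalate]
  | cons b bs ih =>
    rcases bs with _ | ⟨b', bs'⟩
    · simp [List.intercalate]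
    · simp only [List.map_cons, List.flatten_cons, ih]
      simp only [List.intercalate] at *
      rw [show ((b :: b' :: bs') ++ [[]] : List (List Char)) = b :: b' :: (bs' ++ [[]]) from rfl,
          List.intersperse_cons₂, List.flatten_cons, List.flatten_cons]
      rw [show ((b' :: bs') ++ [[]] : List (List Char)) = b' :: (bs' ++ [[]]) from rfl] at ih
      simpa using ih
theorem pv_split_mail (c : Char) (bs : List (List Char)) (h : ∀ b ∈ bs, c ∉ b) :
    PySem.Chars.splitOn (bs.map (· ++ [c])).flatten [c] = bs ++ [[]] := by
  rw [pv_splitOn_singleton, pv_flatten_intercalate]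
  rw [show (List.splitOnP (· == c) ([c].intercalate (bs ++ [[]]))) = List.splitOn c ([c].intercalate (bs ++ [[]])) from rfl]
  apply List.splitOn_intercalate
  · intro l hl
    rcases List.mem_append.1 hl with h' | h'
    · exact h l h'
    · simp at h'; subst h'; simp
  · simp
theorem pv_getD_insert_const {ν : Type} (ids : List String) (v0 : ν) (d : PySem.Dict String ν)
    (v : String) (h : d.getD v v0 = v0) :
    (ids.foldl (fun d x => d.insert x v0) d).getD v v0 = v0 := by
  induction ids generalizing d with
  | nil => simpa using h
  | cons x ids ih =>
    simp only [List.foldl_cons]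
    exact ih _ (by rw [PySem.Dict.getD_insert]; split_ifs <;> simp [h])
theorem pv_set_update_of_mem {α : Type} [BEq α] [LawfulBEq α] (xs : List α) (s : PySem.Set α)
    (h : ∀ x ∈ xs, x ∈ s) : PySem.Set.update s xs = s := by
  induction xs generalizing s with
  | nil => rfl
  | cons x xs ih =>
    have : PySem.Set.add s x = s := PySem.Set.add_of_mem (h x (by simp))
    show PySem.Set.update (PySem.Set.add s x) xs = s
    rw [this]
    exact ih s (fun y hy => h y (by simp [hy]))
theorem pv_getD_foldl_modify_append (l : List String) (key : String → String)
    (val : String → List Char) (d : PySem.Dict String (List Char)) (u : String) :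
    (l.foldl (fun m i => m.modify (key i) [] (· ++ val i)) d).getD u []
      = d.getD u [] ++ ((l.filter (fun i => key i == u)).map val).flatten := by
  induction l generalizing d with
  | nil => simp
  | cons i l ih =>
    simp only [List.foldl_cons, ih, List.filter_cons]
    by_cases hk : (key i == u) = true
    · have h1 : key i = u := eq_of_beq hk
      rw [hk]
      simp only [if_true, List.map_cons, List.flatten_cons]
      rw [PySem.Dict.getD_modify, if_pos h1.symm, h1, List.append_assoc]
    · simp only [Bool.not_eq_true] at hk
      rw [hk]
      simp only [Bool.false_eq_true, if_false]
      rw [PySem.Dict.getD_modify, if_neg (fun e => by rw [e] at hk; simp at hk)]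

-- ===== VERDICT (by name: the statement is the Claim_ definition above) =====
theorem solution_spec : Claim_equal_solution := by
  intro ids report k _ hPre
  unfold Spec_solution
  have hsplit : ∀ i ∈ PySem.Set.ofList report,
      PySem.Chars.splitOn i.toList [' '] = [pvA i, pvB i] ∧
      String.ofList (pvA i) ∈ ids ∧ String.ofList (pvB i) ∈ ids := by
    intro i hi
    have hi' : i ∈ report := (PySem.Set.mem_ofList report i).1 hi
    have hall := List.all_eq_true.1 hPre i hi'
    simp only [pvA, pvB, Bool.and_eq_true, beq_iff_eq, List.contains_iff_mem] at hall ⊢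
    rcases hsp : PySem.Chars.splitOn i.toList [' '] with _ | ⟨a, rest⟩
    · rw [hsp] at hall; simp at hall
    · rcases rest with _ | ⟨b, rest2⟩
      · rw [hsp] at hall; simp at hall
      · rcases rest2 with _ | ⟨x, rest3⟩
        · rw [hsp] at hall
          simpa using ⟨hall.1.2, hall.2⟩
        · rw [hsp] at hall; simp at hall
  simp only [solution, solution_alt]
  set rep := PySem.Set.ofList report with hrep
  set cnt0 := List.foldl (fun d x => d.insert x (0 : Int)) PySem.Dict.empty ids with hcnt0
  set mail0 := List.foldl (fun d x => d.insert x ([] : List Char)) PySem.Dict.empty ids with hmail0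
  -- the two updates of A's loop act on independent components
  have hA : List.foldl
      (fun (st : PySem.Dict String Int × PySem.Dict String (List Char)) i =>
        match PySem.Chars.splitOn i.toList [' '] with
        | [a, b] => (st.1.modify (String.ofList b) 0 fun x => x + 1,
                     st.2.modify (String.ofList a) [] fun x => x ++ (b ++ [' ']))
        | x => st) (cnt0, mail0) rep
      = (List.foldl (fun d i => d.modify (String.ofList (pvB i)) 0 fun x => x + 1) cnt0 rep,
         List.foldl (fun m i => m.modify (String.ofList (pvA i)) [] fun x => x ++ (pvB i ++ [' '])) mail0 rep) := by
    rw [PySem.List.foldl_congr_mem rep _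
        (fun (st : PySem.Dict String Int × PySem.Dict String (List Char)) i =>
          (st.1.modify (String.ofList (pvB i)) 0 fun x => x + 1,
           st.2.modify (String.ofList (pvA i)) [] fun x => x ++ (pvB i ++ [' '])))
        (cnt0, mail0) ?_]
    · exact PySem.List.foldl_prod_mk
        (fun d i => d.modify (String.ofList (pvB i)) 0 fun x => x + 1)
        (fun m i => m.modify (String.ofList (pvA i)) [] fun x => x ++ (pvB i ++ [' ']))
        rep cnt0 mail0
    · intro acc x hx
      rw [(hsplit x hx).1]
  rw [hA]
  have hBcnt : List.foldl
      (fun (d : PySem.Dict String Int) p =>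
        if p.length == 2 then d.modify (String.ofList ((p.drop 1).headD [])) 0 fun x => x + 1
        else d) cnt0 (List.map (fun r => PySem.Chars.splitOn r.toList [' ']) rep)
      = List.foldl (fun d i => d.modify (String.ofList (pvB i)) 0 fun x => x + 1) cnt0 rep := by
    rw [List.foldl_map]
    exact PySem.List.foldl_congr_mem rep _ _ cnt0 (fun acc x hx => by
      rw [(hsplit x hx).1]; simp)
  rw [hBcnt]
  set C := List.foldl (fun d i => d.modify (String.ofList (pvB i)) 0 fun x => x + 1) cnt0 rep with hC
  set M := List.foldl (fun m i => m.modify (String.ofList (pvA i)) [] fun x => x ++ (pvB i ++ [' '])) mail0 rep with hM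
  set banned := PySem.Set.ofList (List.filter (fun u => decide (k ≤ C.getD u 0)) ids) with hbanned
  have hBans : List.foldl
      (fun (d : PySem.Dict String Int) p =>
        if p.length == 2 then
          (if banned.contains (String.ofList ((p.drop 1).headD [])) = true then
            d.modify (String.ofList (p.headD [])) 0 fun x => x + 1 else d)
        else d) cnt0 (List.map (fun r => PySem.Chars.splitOn r.toList [' ']) rep)
      = List.foldl (fun d i => d.modify (String.ofList (pvA i)) 0 fun x => x + 1) cnt0
          (List.filter (fun i => banned.contains (String.ofList (pvB i))) rep) := by
    rw [List.foldl_map, List.foldl_filter]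
    exact PySem.List.foldl_congr_mem rep _ _ cnt0 (fun acc x hx => by
      rw [(hsplit x hx).1]
      simp only [List.length_cons, List.length_nil, List.drop_succ_cons, List.drop_zero,
        List.headD_cons, Nat.reduceAdd, beq_self_eq_true, if_true])
  rw [hBans]
  set ansB := List.foldl (fun d i => d.modify (String.ofList (pvA i)) 0 fun x => x + 1) cnt0
      (List.filter (fun i => banned.contains (String.ofList (pvB i))) rep) with hansB
  -- keys of the mail dict and of B's answer dict are exactly the distinct ids
  have hcnt0keys : cnt0.keys = PySem.Set.ofList ids := by
    rw [hcnt0, PySem.Dict.keys_foldl_insert]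
    rfl
  have hmail0keys : mail0.keys = PySem.Set.ofList ids := by
    rw [hmail0, PySem.Dict.keys_foldl_insert]
    rfl
  have hMkeys : M.keys = PySem.Set.ofList ids := by
    rw [hM, PySem.Dict.keys_foldl_modify_key (key := fun i => String.ofList (pvA i)), hmail0keys]
    exact pv_set_update_of_mem _ _ (by
      intro x hx
      obtain ⟨i, hi, rfl⟩ := List.mem_map.1 hx
      exact (PySem.Set.mem_ofList ids _).2 (hsplit i hi).2.1)
  have hanskeys : ansB.keys = PySem.Set.ofList ids := by
    rw [hansB, PySem.Dict.keys_foldl_modify_key (key := fun i => String.ofList (pvA i)), hcnt0keys]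
    exact pv_set_update_of_mem _ _ (by
      intro x hx
      obtain ⟨i, hi, rfl⟩ := List.mem_map.1 hx
      exact (PySem.Set.mem_ofList ids _).2 (hsplit i (List.mem_of_mem_filter hi)).2.1)
  have hitems : M.items = (PySem.Set.ofList ids).map (fun u => (u, M.getD u [])) := by
    rw [PySem.Dict.items_eq_map_keys M (by rw [hMkeys]; exact PySem.Set.nodup_ofList ids) [], hMkeys]
  have hvalues : ansB.values = (PySem.Set.ofList ids).map (fun u => ansB.getD u 0) := by
    rw [PySem.Dict.values_eq_map_keys ansB (by rw [hanskeys]; exact PySem.Set.nodup_ofList ids) 0, hanskeys]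
  rw [hitems, hvalues, PySem.List.foldl_append_singleton_eq_map, List.nil_append, List.map_map]
  apply List.map_congr_left
  intro u hu
  simp only [Function.comp]
  -- value of the mail dict at u
  have hMval : M.getD u [] = ((rep.filter (fun i => String.ofList (pvA i) == u)).map (fun i => pvB i ++ [' '])).flatten := by
    rw [hM, pv_getD_foldl_modify_append rep (fun i => String.ofList (pvA i)) (fun i => pvB i ++ [' ']) mail0 u,
        pv_getD_insert_const ids ([] : List Char) PySem.Dict.empty u (by simp [pysem]), List.nil_append]
  have hnospace : ∀ b ∈ (rep.filter (fun i => String.ofList (pvA i) == u)).map pvB, ' ' ∉ b := by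
    intro b hb
    obtain ⟨i, hi, rfl⟩ := List.mem_map.1 hb
    have hsp := (hsplit i (List.mem_of_mem_filter hi)).1
    rw [pv_splitOn_singleton] at hsp
    intro hmem
    have := pv_splitOnP_pieces (· == ' ') i.toList (pvB i) (by rw [hsp]; simp) ' ' hmem
    simp at this
  have hsplitmail : PySem.Chars.splitOn (M.getD u []) [' ']
      = ((rep.filter (fun i => String.ofList (pvA i) == u)).map pvB) ++ [[]] := by
    rw [hMval]
    have := pv_split_mail ' ' ((rep.filter (fun i => String.ofList (pvA i) == u)).map pvB) hnospace
    rw [List.map_map] at this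
    simpa [Function.comp] using this
  -- value of B's answer dict at u
  have hansval : ansB.getD u 0
      = (((rep.filter (fun i => banned.contains (String.ofList (pvB i)))).map (fun i => String.ofList (pvA i))).count u : Int) := by
    rw [hansB, ← List.foldl_map (f := fun i => String.ofList (pvA i))
          (g := fun (d : PySem.Dict String Int) x => d.modify x 0 fun v => v + 1),
        PySem.Dict.getD_foldl_modify_add_one,
        pv_getD_insert_const ids (0 : Int) PySem.Dict.empty u (by simp [pysem]), zero_add]
  rw [hsplitmail, PySem.List.slice_to_neg_one, List.dropLast_concat, hansval]
  norm_cast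
  rw [← List.countP_eq_length_filter, List.countP_map, List.count_eq_countP, List.countP_map,
      List.countP_filter, List.countP_filter]
  apply List.countP_congr
  intro i hi
  have hb : banned.contains (String.ofList (pvB i)) = decide (k ≤ C.getD (String.ofList (pvB i)) 0) := by
    have hmem := (hsplit i hi).2.2
    by_cases hk : k ≤ C.getD (String.ofList (pvB i)) 0
    · simp only [hk, decide_true]
      exact (PySem.Set.contains_iff _ _).2 ((PySem.Set.mem_ofList _ _).2 (List.mem_filter.2 ⟨hmem, by simp [hk]⟩))
    · simp only [hk, decide_false]
      rcases h' : banned.contains (String.ofList (pvB i)) with _ | _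
      · rfl
      · have := (PySem.Set.contains_iff _ _).1 h'
        have := List.mem_filter.1 ((PySem.Set.mem_ofList _ _).1 this)
        simp [hk] at this
  simp only [Function.comp, hb]
  constructor <;> (intro h; simp only [Bool.and_eq_true] at h ⊢; exact ⟨h.2, h.1⟩)
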